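-- pv_equiv track=rewrite | github.com/walkccc/LeetCode | solutions/555. Split Concatenated Strings/555.py | splitLoopedString
-- ===== SOURCE A (Python) =====
-- def splitLoopedString(strs: list[str]) -> str:
--   ans = ''
--   sortedStrs = [max(s, s[::-1]) for s in strs]
--
--   for i, sortedStr in enumerate(sortedStrs):
--     for s in (sortedStr, sortedStr[::-1]):
--       for j in range(len(s) + 1):
--         ans = max(
--             ans, s[j:] + ''.join(sortedStrs[i + 1:] + sortedStrs[:i]) + s[:j])
--
--   return ans
-- ===== SOURCE B (Python) =====
-- def splitLoopedString(strs: list[str]) -> str: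
--   oriented = [max(s, s[::-1]) for s in strs]
--   ans = ''
--   for i, w in enumerate(oriented):
--     middle = ''.join(oriented[i + 1:] + oriented[:i])
--     for s in (w, w[::-1]):
--       cand = middle + s  # the cut at j == len(s)
--       if ans < cand:
--         ans = cand
--       if s:
--         c = max(s)  # cuts not starting with the maximal character are dominated
--         for j in range(len(s)):
--           if s[j] == c:
--             cand = s[j:] + middle + s[:j]
--             if ans < cand:
--               ans = cand
--   return ans
-- ===== Notes on version B (the rewrite author's own statement) =====
-- stated objective: faster
-- what changed: B prunes the cut enumeration: instead of trying all len(s)+1 cuts of each oriented word, it tries only the full-rotation cut and the cuts that start at an occurrence of the word's maximal character, since any other cut yields a string with a strictly smaller first character and is dominated; the middle is also built once per word instead of once per cut.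
import Mathlib
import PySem

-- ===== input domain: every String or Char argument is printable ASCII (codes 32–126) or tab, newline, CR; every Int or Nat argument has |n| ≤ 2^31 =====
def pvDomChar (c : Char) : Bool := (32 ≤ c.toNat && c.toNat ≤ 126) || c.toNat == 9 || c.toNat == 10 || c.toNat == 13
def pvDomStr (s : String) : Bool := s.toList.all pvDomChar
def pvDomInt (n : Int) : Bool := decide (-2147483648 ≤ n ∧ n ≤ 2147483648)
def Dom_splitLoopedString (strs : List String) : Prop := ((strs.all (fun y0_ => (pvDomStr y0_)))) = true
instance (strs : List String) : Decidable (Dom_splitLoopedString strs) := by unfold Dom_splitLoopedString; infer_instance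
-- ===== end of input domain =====

-- B prunes the cut enumeration: instead of trying every cut j of each oriented word,
-- it tries only the full-rotation cut j = len(s) and the cuts starting at an occurrence
-- of the word's maximal character — every other cut is strictly dominated, so the
-- maximum is unchanged; objective: faster on typical inputs (fewer candidates built).

-- ===== PORT A =====
-- Python max(a, b) on strings (returns the first argument on ties)
def pymaxS (a b : String) : String := if a < b then b else a
-- s[::-1]
def pyRevS (s : String) : String := String.ofList s.toList.reverse
-- ''.join(l)
def joinS (l : List String) : String := String.ofList (l.flatMap String.toList)
-- the `for i, sortedStr in enumerate(sortedStrs)` loop of A (i carried explicitly);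
-- s[j:] / s[:j] with 0 ≤ j ≤ len(s) are exactly drop/take on the character list
def aLoop (full : List String) : Nat → List String → String → String
  | _, [], ans => ans
  | i, w :: rest, ans =>
    let ans :=
      [w, pyRevS w].foldl (fun ans s =>
        (List.range (s.toList.length + 1)).foldl (fun ans j =>
          pymaxS ans (String.ofList (s.toList.drop j) ++
            joinS (full.drop (i + 1) ++ full.take i) ++
            String.ofList (s.toList.take j))) ans) ans
    aLoop full (i + 1) rest ans

def splitLoopedString (strs : List String) : String :=
  let sortedStrs := strs.map (fun s => pymaxS s (pyRevS s))
  aLoop sortedStrs 0 sortedStrs ""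

-- ===== PORT B =====
-- Python max(s) over the characters of a nonempty string (guarded by `if s:` in Source B)
def pyMaxChar : List Char → Char
  | [] => ' '   -- unreachable: Source B only calls max(s) when s is nonempty
  | x :: t => t.foldl max x

-- the body of Source B's orientation loop: the cut at j == len(s), then only the cuts at
-- occurrences of the maximal character c (`if s[j] == c:`)
def bCuts (middle : String) (s : List Char) (ans0 : String) : String :=
  let cand0 := middle ++ String.ofList s
  let ans1 := if ans0 < cand0 then cand0 else ans0
  if s.isEmpty then ans1
  else
    let c := pyMaxChar s
    (List.range s.length).foldl (fun ans j =>
      if s.getD j ' ' = c then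
        let cand := String.ofList (s.drop j) ++ middle ++ String.ofList (s.take j)
        if ans < cand then cand else ans
      else ans) ans1

-- the `for i, w in enumerate(oriented)` loop of Source B (middle built once per word)
def bLoop (oriented : List String) : Nat → List String → String → String
  | _, [], ans => ans
  | i, w :: rest, ans =>
    let middle := joinS (oriented.drop (i + 1) ++ oriented.take i)
    let ans := [w, pyRevS w].foldl (fun ans s => bCuts middle s.toList ans) ans
    bLoop oriented (i + 1) rest ans

def splitLoopedString_alt (strs : List String) : String :=
  let oriented := strs.map (fun s => pymaxS s (pyRevS s))
  bLoop oriented 0 oriented ""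

-- ===== PRECONDITION & SPEC =====
def Spec_splitLoopedString (strs : List String) (out : String) : Prop := out = splitLoopedString_alt strs
instance (strs : List String) (out : String) : Decidable (Spec_splitLoopedString strs out) := by unfold Spec_splitLoopedString; infer_instance

-- ===== CLAIM (what is proved, stated in full; the proofs are below) =====
def Claim_equal_splitLoopedString : Prop := ∀ (strs : List String), Dom_splitLoopedString strs → Spec_splitLoopedString strs (splitLoopedString strs)

-- ===== LEMMAS AND PROOFS =====

-- A's candidate for cut j of oriented word s around middle
def candA (middle : String) (s : List Char) (j : Nat) : String :=
  String.ofList (s.drop j) ++ middle ++ String.ofList (s.take j)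

theorem pymaxS_eq_max (a b : String) : pymaxS a b = max a b := by
  unfold pymaxS
  rcases lt_trichotomy a b with h | h | h
  · simp [h, max_eq_right (le_of_lt h)]
  · simp [h]
  · simp [not_lt_of_gt h, max_eq_left (le_of_lt h)]

theorem foldl_max_le {α : Type} [LinearOrder α] (l : List α) (a m : α)
    (ha : a ≤ m) (h : ∀ x ∈ l, x ≤ m) : l.foldl max a ≤ m := by
  induction l generalizing a with
  | nil => simpa using ha
  | cons x t ih =>
    simp only [List.foldl_cons]
    exact ih (max a x) (max_le ha (h x (by simp))) (fun y hy => h y (by simp [hy]))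

-- the running max is unchanged when each list dominates the other elementwise
theorem foldl_max_eq_dom {α : Type} [LinearOrder α] (l l' : List α) (a : α)
    (h1 : ∀ x ∈ l, ∃ y ∈ l', x ≤ y) (h2 : ∀ y ∈ l', y ∈ l) :
    l.foldl max a = l'.foldl max a := by
  apply le_antisymm
  · refine foldl_max_le l a _ (PySem.List.le_foldl_max l' a).1 (fun x hx => ?_)
    obtain ⟨y, hy, hxy⟩ := h1 x hx
    exact le_trans hxy ((PySem.List.le_foldl_max l' a).2 y hy)
  · refine foldl_max_le l' a _ (PySem.List.le_foldl_max l a).1 (fun y hy => ?_)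
    exact (PySem.List.le_foldl_max l a).2 y (h2 y hy)

-- a guarded running max is the running max over the filtered candidates
theorem foldl_if_filter (l : List Nat) (p : Nat → Prop) [DecidablePred p]
    (f : Nat → String) (a : String) :
    l.foldl (fun ans j => if p j then (if ans < f j then f j else ans) else ans) a
      = ((l.filter (fun j => decide (p j))).map f).foldl max a := by
  induction l generalizing a with
  | nil => rfl
  | cons x t ih =>
    by_cases hp : p x
    · rw [List.foldl_cons, if_pos hp, List.filter_cons_of_pos (by simpa using hp),
        List.map_cons, List.foldl_cons, ih]
      congr 1
      rw [← pymaxS_eq_max]; rfl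
    · rw [List.foldl_cons, if_neg hp, List.filter_cons_of_neg (by simpa using hp), ih]

theorem candA_lt (middle : String) (s : List Char) (j k : Nat)
    (hj : j < s.length) (hk : k < s.length) (h : s.getD j ' ' < s.getD k ' ') :
    candA middle s j < candA middle s k := by
  rw [List.getD_eq_getElem s ' ' hj, List.getD_eq_getElem s ' ' hk] at h
  have hdj := List.drop_eq_getElem_cons hj
  have hdk := List.drop_eq_getElem_cons hk
  unfold candA
  rw [String.lt_iff_toList_lt]
  simp only [String.toList_append, String.toList_ofList, hdj, hdk, List.cons_append]
  exact List.Lex.rel h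

theorem pyMaxChar_spec (x : Char) (t : List Char) :
    pyMaxChar (x :: t) ∈ (x :: t) ∧ ∀ y ∈ (x :: t), y ≤ pyMaxChar (x :: t) := by
  constructor
  · rcases PySem.List.foldl_max_mem t x with h | h
    · simp [pyMaxChar, h]
    · simp [pyMaxChar, h]
  · intro y hy
    rcases List.mem_cons.mp hy with h | h
    · simpa [pyMaxChar, h] using (PySem.List.le_foldl_max t x).1
    · exact (PySem.List.le_foldl_max t x).2 y h

theorem candA_last (middle : String) (s : List Char) :
    candA middle s s.length = middle ++ String.ofList s := by
  simp [candA]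

-- the pruned cut enumeration of B computes A's full running max
theorem inner_eq (middle : String) (s : String) (ans : String) :
    (List.range (s.toList.length + 1)).foldl (fun ans j =>
        pymaxS ans (String.ofList (s.toList.drop j) ++ middle ++
          String.ofList (s.toList.take j))) ans
      = bCuts middle s.toList ans := by
  have hLHS : ∀ (u : List Char),
      (List.range (u.length + 1)).foldl (fun ans j =>
        pymaxS ans (String.ofList (u.drop j) ++ middle ++ String.ofList (u.take j))) ans
      = ((List.range (u.length + 1)).map (candA middle u)).foldl max ans := by
    intro u
    rw [List.foldl_map]
    simp only [pymaxS_eq_max, candA]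
  rw [hLHS]
  rcases hu : s.toList with _ | ⟨x, t'⟩
  · have hB : bCuts middle [] ans = pymaxS ans (middle ++ String.ofList []) := rfl
    rw [hB, pymaxS_eq_max]
    simp [candA, List.range_succ]
  · set u : List Char := x :: t' with hu'
    have hne : ¬ u.isEmpty = true := by simp [hu']
    have hmax := pyMaxChar_spec x t'
    rw [← hu'] at hmax
    -- unfold B's side into a running max over explicit candidates
    have h1 : (if ans < middle ++ String.ofList u then middle ++ String.ofList u else ans)
        = max ans (middle ++ String.ofList u) := by rw [← pymaxS_eq_max]; rfl
    have hRHS : bCuts middle u ans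
        = ((candA middle u u.length ::
            ((List.range u.length).filter
              (fun j => decide (u.getD j ' ' = pyMaxChar u))).map
              (candA middle u))).foldl max ans := by
      simp only [bCuts]
      rw [if_neg hne]
      rw [foldl_if_filter (List.range u.length) (fun j => u.getD j ' ' = pyMaxChar u)
        (fun j => String.ofList (u.drop j) ++ middle ++ String.ofList (u.take j)), h1,
        List.foldl_cons, candA_last, ← pymaxS_eq_max]
      unfold candA
      rfl
    rw [hRHS]
    -- both sides are running maxima over mutually dominating candidate lists
    apply foldl_max_eq_dom
    · intro xc hxc
      obtain ⟨j, hj, rfl⟩ := List.mem_map.mp hxc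
      rw [List.mem_range] at hj
      by_cases hjn : j = u.length
      · exact ⟨candA middle u u.length, by simp, by rw [hjn]⟩
      · have hjl : j < u.length := lt_of_le_of_ne (Nat.lt_succ_iff.mp hj) hjn
        by_cases hjc : u.getD j ' ' = pyMaxChar u
        · refine ⟨candA middle u j, ?_, le_refl _⟩
          exact List.mem_cons_of_mem _ (List.mem_map_of_mem
            (List.mem_filter.mpr ⟨List.mem_range.mpr hjl, by simpa using hjc⟩))
        · obtain ⟨k, hk, hks⟩ := List.getElem_of_mem hmax.1
          have hkc : u.getD k ' ' = pyMaxChar u := by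
            rw [List.getD_eq_getElem u ' ' hk, hks]
          have hlt : u.getD j ' ' < u.getD k ' ' := by
            rw [hkc]
            exact lt_of_le_of_ne (by
              rw [List.getD_eq_getElem u ' ' hjl]
              exact hmax.2 _ (List.getElem_mem hjl)) hjc
          refine ⟨candA middle u k, ?_, le_of_lt (candA_lt middle u j k hjl hk hlt)⟩
          exact List.mem_cons_of_mem _ (List.mem_map_of_mem
            (List.mem_filter.mpr ⟨List.mem_range.mpr hk, by simpa using hkc⟩))
    · intro y hy
      rcases List.mem_cons.mp hy with rfl | hy
      · exact List.mem_map_of_mem (List.mem_range.mpr (Nat.lt_succ_self _))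
      · obtain ⟨j, hj, rfl⟩ := List.mem_map.mp hy
        have := (List.mem_filter.mp hj).1
        rw [List.mem_range] at this
        exact List.mem_map_of_mem (List.mem_range.mpr (Nat.lt_succ_of_lt this))

theorem loop_eq (oriented : List String) (rest : List String) : ∀ (i : Nat) (ans : String),
    aLoop oriented i rest ans = bLoop oriented i rest ans := by
  induction rest with
  | nil => intro i ans; rfl
  | cons w rest ih =>
    intro i ans
    rw [aLoop, bLoop]
    simp only [List.foldl_cons, List.foldl_nil]
    rw [inner_eq, inner_eq, ih]

-- ===== VERDICT (by name: the statement is the Claim_ definition above) =====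
theorem splitLoopedString_spec : Claim_equal_splitLoopedString := by
  intro strs _
  show splitLoopedString strs = splitLoopedString_alt strs
  unfold splitLoopedString splitLoopedString_alt
  exact loop_eq _ _ 0 ""
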